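-- pv_equiv track=rewrite | github.com/pfuerste/genetic_adversaries | eval_dict.py | sort_status
-- ===== SOURCE A (Python) =====
-- def sort_status(dic):
--     og = dict()
--     tar = dict()
--     ntar = dict()
--     for key, val in dic.items():
--         if val['status'] == 'original':
--             og[key] = val
--         elif val['status'] == 'tar':
--             tar[key] = val
--         elif val['status'] == 'ntar':
--             ntar[key] = val
--     return og, ntar, tar
-- ===== SOURCE B (Python) =====
-- def sort_status(dic):
--     def pick(status):
--         return {key: val for key, val in dic.items() if val['status'] == status}
--     return pick('original'), pick('ntar'), pick('tar')
-- ===== Notes on version B (the rewrite author's own statement) =====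
-- stated objective: simpler
-- what changed: Replaces the single-pass three-way if/elif dispatch into three accumulator dicts by three staged passes, each a filtered dict comprehension selecting one status, returned directly in (og, ntar, tar) order.
import Mathlib
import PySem

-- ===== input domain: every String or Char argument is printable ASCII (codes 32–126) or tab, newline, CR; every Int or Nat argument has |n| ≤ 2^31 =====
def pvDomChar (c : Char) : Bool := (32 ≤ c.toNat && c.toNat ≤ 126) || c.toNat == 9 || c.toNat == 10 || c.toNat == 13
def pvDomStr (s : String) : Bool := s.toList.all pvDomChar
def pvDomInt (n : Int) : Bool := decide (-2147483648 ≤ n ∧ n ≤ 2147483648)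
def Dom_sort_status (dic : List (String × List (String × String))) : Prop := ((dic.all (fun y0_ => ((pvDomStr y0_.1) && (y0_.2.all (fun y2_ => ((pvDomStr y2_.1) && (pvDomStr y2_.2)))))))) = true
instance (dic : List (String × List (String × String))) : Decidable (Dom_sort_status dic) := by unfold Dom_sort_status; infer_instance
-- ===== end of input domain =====

-- B replaces A's single-pass three-way if/elif dispatch by three staged filtered passes,
-- one dict comprehension per status. Return-value equivalence only.

-- ===== PORT A =====
-- one loop step of A: dispatch (key, val) into og / tar / ntar according to val['status']
def sortStatusStepA
    (st : PySem.Dict String (List (String × String)) × PySem.Dict String (List (String × String)) × PySem.Dict String (List (String × String)))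
    (kv : String × List (String × String)) :
    PySem.Dict String (List (String × String)) × PySem.Dict String (List (String × String)) × PySem.Dict String (List (String × String)) :=
  match (PySem.Dict.mk kv.2).get? "status" with
  | some s =>
      if s = "original" then (st.1.insert kv.1 kv.2, st.2.1, st.2.2)
      else if s = "tar" then (st.1, st.2.1.insert kv.1 kv.2, st.2.2)
      else if s = "ntar" then (st.1, st.2.1, st.2.2.insert kv.1 kv.2)
      else st
  | none => st  -- Python raises KeyError here; excluded by Pre_sort_status

def sort_status (dic : List (String × List (String × String))) : (List (String × List (String × String))) × (List (String × List (String × String))) × (List (String × List (String × String))) :=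
  let st := dic.foldl sortStatusStepA (PySem.Dict.empty, PySem.Dict.empty, PySem.Dict.empty)
  (st.1.items, st.2.2.items, st.2.1.items)  -- return og, ntar, tar

-- ===== PORT B =====
-- the dict comprehension {key: val for key, val in dic.items() if val['status'] == status}
def sortStatusPick (dic : List (String × List (String × String))) (status : String) :
    PySem.Dict String (List (String × String)) :=
  dic.foldl (fun d kv =>
    match (PySem.Dict.mk kv.2).get? "status" with
    | some s => if s = status then d.insert kv.1 kv.2 else d
    | none => d  -- Python raises KeyError here; excluded by Pre_sort_status
  ) PySem.Dict.empty

def sort_status_alt (dic : List (String × List (String × String))) : (List (String × List (String × String))) × (List (String × List (String × String))) × (List (String × List (String × String))) :=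
  ((sortStatusPick dic "original").items,
   (sortStatusPick dic "ntar").items,
   (sortStatusPick dic "tar").items)

-- ===== PRECONDITION & SPEC =====
-- A (and B) raise KeyError on any entry whose value lacks a 'status' key; exactly those inputs are excluded.
def Pre_sort_status (dic : List (String × List (String × String))) : Prop :=
  ∀ kv ∈ dic, ((PySem.Dict.mk kv.2).get? "status").isSome = true
instance (dic : List (String × List (String × String))) : Decidable (Pre_sort_status dic) := by unfold Pre_sort_status; infer_instance

def pvWitness_sort_status : (List (String × List (String × String))) :=
  [("k1", [("status", "original"), ("x", "y")]),
   ("k2", [("status", "tar")]),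
   ("k3", [("status", "ntar")]),
   ("k4", [("status", "weird")])]

def Spec_sort_status (dic : List (String × List (String × String))) (out : (List (String × List (String × String))) × (List (String × List (String × String))) × (List (String × List (String × String)))) : Prop := out = sort_status_alt dic
instance (dic : List (String × List (String × String))) (out : (List (String × List (String × String))) × (List (String × List (String × String))) × (List (String × List (String × String)))) : Decidable (Spec_sort_status dic out) := by unfold Spec_sort_status; infer_instance

-- ===== CLAIM =====
def Claim_equal_sort_status : Prop := ∀ (dic : List (String × List (String × String))), Dom_sort_status dic → Pre_sort_status dic → Spec_sort_status dic (sort_status dic)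

-- ===== LEMMAS AND PROOFS =====

-- loop fusion: A's single fold over a triple of dicts is the triple of B's three filtered folds
theorem sortStatus_fold_split (dic : List (String × List (String × String)))
    (o t n : PySem.Dict String (List (String × String))) :
    dic.foldl sortStatusStepA (o, t, n)
    = (dic.foldl (fun d kv =>
         match (PySem.Dict.mk kv.2).get? "status" with
         | some s => if s = "original" then d.insert kv.1 kv.2 else d
         | none => d) o,
       dic.foldl (fun d kv =>
         match (PySem.Dict.mk kv.2).get? "status" with
         | some s => if s = "tar" then d.insert kv.1 kv.2 else d
         | none => d) t,
       dic.foldl (fun d kv =>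
         match (PySem.Dict.mk kv.2).get? "status" with
         | some s => if s = "ntar" then d.insert kv.1 kv.2 else d
         | none => d) n) := by
  induction dic generalizing o t n with
  | nil => rfl
  | cons kv tl ih =>
      simp only [List.foldl_cons]
      rw [show sortStatusStepA (o, t, n) kv
          = ((match (PySem.Dict.mk kv.2).get? "status" with
              | some s => if s = "original" then o.insert kv.1 kv.2 else o
              | none => o),
             (match (PySem.Dict.mk kv.2).get? "status" with
              | some s => if s = "tar" then t.insert kv.1 kv.2 else t
              | none => t),
             (match (PySem.Dict.mk kv.2).get? "status" with
              | some s => if s = "ntar" then n.insert kv.1 kv.2 else n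
              | none => n)) from by
        unfold sortStatusStepA
        cases h : (PySem.Dict.mk kv.2).get? "status" with
        | none => rfl
        | some s =>
            by_cases h1 : s = "original"
            · subst h1; simp
            · by_cases h2 : s = "tar"
              · subst h2; simp
              · by_cases h3 : s = "ntar"
                · subst h3; simp
                · simp [h1, h2, h3]]
      exact ih _ _ _

-- ===== VERDICT =====
theorem sort_status_spec : Claim_equal_sort_status := by
  intro dic _ _
  unfold Spec_sort_status sort_status sort_status_alt sortStatusPick
  rw [sortStatus_fold_split]
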